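-- pv_equiv track=rewrite | github.com/vshahrooz/YangTreeParser | YangTreeParser.py | parse_tree_and_build_paths
-- ===== SOURCE A (Python) =====
-- def parse_tree_and_build_paths(tree_str):
--     """
--     Parse pyang tree output lines and build all paths (like XPath) of leaves and containers.
--     Returns a list of string paths.
--     """
--     lines = tree_str.splitlines()
--     paths = []
--     stack = []
--
--     for line in lines:
--         if not line.strip():
--             continue
--         indent = len(line) - len(line.lstrip(' '))
--         parts = line.strip().split()
--         if len(parts) < 2:
--             continue
--         node_name = parts[1]
--
--         if '*' in node_name:
--             node_name = node_name.replace('*', '')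
--         if node_name.endswith('?'):
--             node_name = node_name[:-1]
--
--         level = indent // 3
--
--         while stack and stack[-1][0] >= level:
--             stack.pop()
--
--         stack.append((level, node_name))
--
--         path_parts = [n for _, n in stack]
--         path_str = "/".join(path_parts)
--         paths.append(path_str)
--
--     return paths
-- ===== SOURCE B (Python) =====
-- def parse_tree_and_build_paths(tree_str):
--     """
--     Parse pyang tree output lines and build all paths (like XPath) of leaves and containers.
--     Returns a list of string paths.
--     """
--     # stage 1: parse every significant line into a (level, name) record
--     nodes = []
--     for line in tree_str.splitlines():
--         parts = line.strip().split()
--         if len(parts) < 2: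
--             continue
--         name = parts[1]
--         if '*' in name:
--             name = name.replace('*', '')
--         if name.endswith('?'):
--             name = name[:-1]
--         nodes.append(((len(line) - len(line.lstrip(' '))) // 3, name))
--
--     # stage 2: the parent of node i is the nearest earlier node with a smaller
--     # level; its (already computed) full path is extended by one component
--     paths = []
--     for i, (level, name) in enumerate(nodes):
--         j = i - 1
--         while j >= 0 and nodes[j][0] >= level:
--             j -= 1
--         paths.append(paths[j] + '/' + name if j >= 0 else name)
--     return paths
-- ===== Notes on version B (the rewrite author's own statement) =====
-- stated objective: alternative
-- what changed: B replaces A's single pass with a mutable pop-and-join stack by a two-stage pipeline: stage 1 parses every significant line into a (level, name) record, stage 2 computes each path with a backward index scan for the nearest earlier record of smaller level (the parent) and extends that parent's memoized full path by one component, so there is no stack and no per-line join over it.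
import Mathlib
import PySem

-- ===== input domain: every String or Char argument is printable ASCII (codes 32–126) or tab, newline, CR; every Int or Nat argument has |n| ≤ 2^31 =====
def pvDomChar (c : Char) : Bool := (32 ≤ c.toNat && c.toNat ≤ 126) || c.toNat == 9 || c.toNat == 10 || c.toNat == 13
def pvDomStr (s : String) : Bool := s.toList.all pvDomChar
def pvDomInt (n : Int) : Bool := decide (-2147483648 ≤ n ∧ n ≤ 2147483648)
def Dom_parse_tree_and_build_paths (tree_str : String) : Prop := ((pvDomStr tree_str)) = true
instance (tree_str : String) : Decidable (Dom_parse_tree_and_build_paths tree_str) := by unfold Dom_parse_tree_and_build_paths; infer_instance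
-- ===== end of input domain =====

-- B replaces A's mutable pop-and-join stack with a two-stage pipeline: first parse all lines
-- into (level, name) records, then build each path by a backward scan for the nearest earlier
-- record with a smaller level, extending that parent's memoized full path. Objective: alternative.

-- ===== PORT A =====
-- while stack and stack[-1][0] >= level: stack.pop()
def pvPopGE (stack : List (Int × String)) (level : Int) : List (Int × String) :=
  match h : stack.getLast? with
  | some e => if level ≤ e.1 then pvPopGE stack.dropLast level else stack
  | none => stack
termination_by stack.length
decreasing_by
  cases stack with
  | nil => simp at h
  | cons a t => simp [List.length_dropLast]

-- the loop body of A
def pvStepA (st : List String × List (Int × String)) (line : String) : List String × List (Int × String) :=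
  let (paths, stack) := st
  if PySem.Str.strip line = "" then (paths, stack)
  else
    -- line.lstrip(' ') ported by hand (drops leading ' ' characters only): exact
    let indent : Int := (PySem.Str.len line : Int) - ((line.toList.dropWhile (fun c => c == ' ')).length : Int)
    let parts := PySem.Str.split₀ (PySem.Str.strip line)
    if parts.length < 2 then (paths, stack)
    else
      let node_name := PySem.List.pyGetD parts 1 ""
      let node_name := if PySem.Str.isIn "*" node_name then PySem.Str.replace node_name "*" "" else node_name
      let node_name := if PySem.Str.endswith node_name "?" then PySem.Str.slice node_name none (some (-1)) else node_name
      let level := PySem.Int.floordiv indent 3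
      let stack := pvPopGE stack level
      let stack := stack ++ [(level, node_name)]
      let path_str := PySem.Str.join "/" (stack.map (·.2))
      (paths ++ [path_str], stack)

def parse_tree_and_build_paths (tree_str : String) : List String :=
  ((PySem.Str.splitlines tree_str).foldl pvStepA ([], [])).1

-- ===== PORT B =====
-- stage 1: parse one line into (level, name), or skip it (the 'continue')
def pvParseLine (line : String) : Option (Int × String) :=
  let parts := PySem.Str.split₀ (PySem.Str.strip line)
  if parts.length < 2 then none
  else
    let name := PySem.List.pyGetD parts 1 ""
    let name := if PySem.Str.isIn "*" name then PySem.Str.replace name "*" "" else name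
    let name := if PySem.Str.endswith name "?" then PySem.Str.slice name none (some (-1)) else name
    -- line.lstrip(' ') ported by hand (drops leading ' ' characters only): exact
    some (PySem.Int.floordiv ((PySem.Str.len line : Int) - ((line.toList.dropWhile (fun c => c == ' ')).length : Int)) 3, name)

-- the backward scan 'j = i-1; while j >= 0 and nodes[j][0] >= level: j -= 1' followed by
-- 'paths[j] if j >= 0 else ...': hist holds (nodes[j][0], paths[j]) most-recent first
def pvParentPath : List (Int × String) → Int → Option String
  | [], _ => none
  | (l, p) :: rest, lv => if lv ≤ l then pvParentPath rest lv else some p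

-- the loop body of B's stage 2
def pvStepB (st : List String × List (Int × String)) (node : Int × String) : List String × List (Int × String) :=
  let (paths, hist) := st
  let path := match pvParentPath hist node.1 with
    | none => node.2
    | some p => p ++ "/" ++ node.2
  (paths ++ [path], (node.1, path) :: hist)

def parse_tree_and_build_paths_alt (tree_str : String) : List String :=
  (((PySem.Str.splitlines tree_str).filterMap pvParseLine).foldl pvStepB ([], [])).1

-- ===== PRECONDITION & SPEC =====
def Spec_parse_tree_and_build_paths (tree_str : String) (out : List String) : Prop := out = parse_tree_and_build_paths_alt tree_str
instance (tree_str : String) (out : List String) : Decidable (Spec_parse_tree_and_build_paths tree_str out) := by unfold Spec_parse_tree_and_build_paths; infer_instance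

-- ===== CLAIM (what is proved, stated in full; the proofs are below) =====
def Claim_equal_parse_tree_and_build_paths : Prop := ∀ (tree_str : String), Dom_parse_tree_and_build_paths tree_str → Spec_parse_tree_and_build_paths tree_str (parse_tree_and_build_paths tree_str)

-- ===== LEMMAS AND PROOFS =====

-- A's stack with each name replaced by the cumulative path down to it
def pvP (pre : Option String) (s : String) : String :=
  match pre with
  | none => s
  | some q => q ++ "/" ++ s

def pvPathify : Option String → List (Int × String) → List (Int × String)
  | _, [] => []
  | pre, (l, n) :: rest => (l, pvP pre n) :: pvPathify (some (pvP pre n)) rest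

def pvJoin (names : List String) : String := PySem.Str.join "/" names

-- keep the longest prefix with level < l (the surviving part of the stack)
def pvTruncLT (stack : List (Int × String)) (level : Int) : List (Int × String) :=
  match stack with
  | [] => []
  | e :: rest => if e.1 < level then e :: pvTruncLT rest level else []

lemma pvJoin_singleton (n : String) : pvJoin [n] = n := by
  apply String.toList_inj.mp
  simp [pvJoin, PySem.Str.toList_join, PySem.Chars.join_singleton]

lemma pvJoin_cons (n : String) (xs : List String) (h : xs ≠ []) :
    pvJoin (n :: xs) = n ++ "/" ++ pvJoin xs := by
  obtain ⟨y, ys, rfl⟩ := List.exists_cons_of_ne_nil h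
  apply String.toList_inj.mp
  simp [pvJoin, PySem.Str.toList_join, PySem.Chars.join_cons_cons, String.toList_append]

lemma pvJoin_snoc (xs : List String) (n : String) (h : xs ≠ []) :
    pvJoin (xs ++ [n]) = pvJoin xs ++ "/" ++ n := by
  induction xs with
  | nil => simp at h
  | cons y ys ih =>
    cases ys with
    | nil => simp [pvJoin_cons y [n] (by simp), pvJoin_singleton]
    | cons z zs =>
      rw [List.cons_append, pvJoin_cons y ((z :: zs) ++ [n]) (by simp),
        pvJoin_cons y (z :: zs) (by simp), ih (by simp)]
      apply String.toList_inj.mp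
      simp [String.toList_append]

lemma pvP_append (pre : Option String) (a b c : String) :
    pvP pre (a ++ b ++ c) = pvP pre a ++ b ++ c := by
  cases pre <;> (apply String.toList_inj.mp; simp [pvP, String.toList_append])

lemma pvPathify_snoc (st : List (Int × String)) (pre : Option String) (l : Int) (n : String) :
    pvPathify pre (st ++ [(l, n)]) =
      pvPathify pre st ++ [(l, pvP pre (pvJoin (st.map (·.2) ++ [n])))] := by
  induction st generalizing pre with
  | nil => simp [pvPathify, pvJoin_singleton]
  | cons e st ih =>
    obtain ⟨l1, n1⟩ := e
    have key : pvP pre (pvJoin (n1 :: (st.map (·.2) ++ [n])))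
        = pvP (some (pvP pre n1)) (pvJoin (st.map (·.2) ++ [n])) := by
      rw [pvJoin_cons n1 _ (by simp), pvP_append]; rfl
    simp only [List.cons_append, pvPathify, ih, List.map_cons, key]

lemma pvTruncLT_eq_takeWhile (st : List (Int × String)) (l : Int) :
    pvTruncLT st l = st.takeWhile (fun e => decide (e.1 < l)) := by
  induction st with
  | nil => rfl
  | cons e rest ih =>
    by_cases h : e.1 < l <;> simp [pvTruncLT, h, ih]

lemma pvTruncLT_eq_self (st : List (Int × String)) (l : Int) (h : ∀ x ∈ st, x.1 < l) :
    pvTruncLT st l = st := by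
  induction st with
  | nil => rfl
  | cons e rest ih =>
    simp only [pvTruncLT, if_pos (h e (by simp))]
    rw [ih (fun x hx => h x (by simp [hx]))]

lemma pvTruncLT_snoc_stop (st : List (Int × String)) (e : Int × String) (l : Int)
    (h : ¬ e.1 < l) : pvTruncLT (st ++ [e]) l = pvTruncLT st l := by
  induction st with
  | nil => simp [pvTruncLT, h]
  | cons x rest ih =>
    by_cases hx : x.1 < l <;> simp [pvTruncLT, hx, ih]

lemma pvTruncLT_mem_lt (st : List (Int × String)) (l : Int) (x : Int × String)
    (hx : x ∈ pvTruncLT st l) : x.1 < l := by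
  rw [pvTruncLT_eq_takeWhile] at hx
  simpa using List.mem_takeWhile_imp hx

lemma pvTruncLT_trunc (st : List (Int × String)) (l lv : Int) (h : l ≤ lv) :
    pvTruncLT (pvTruncLT st lv) l = pvTruncLT st l := by
  induction st with
  | nil => rfl
  | cons e rest ih =>
    by_cases h1 : e.1 < l
    · have h2 : e.1 < lv := by omega
      simp [pvTruncLT, h1, h2, ih]
    · by_cases h2 : e.1 < lv <;> simp [pvTruncLT, h1, h2]

lemma pvPopGE_eq_truncLT (st : List (Int × String)) (l : Int)
    (h : List.Pairwise (fun a b : Int × String => a.1 < b.1) st) :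
    pvPopGE st l = pvTruncLT st l := by
  induction st using List.reverseRecOn with
  | nil => rw [pvPopGE]; rfl
  | append_singleton st e ih =>
    rw [pvPopGE]
    split
    · rename_i e1 heq
      rw [List.getLast?_concat] at heq
      rw [show e1 = e from (Option.some.inj heq).symm, List.dropLast_concat]
      by_cases hl : l ≤ e.1
      · rw [if_pos hl, ih (h.sublist (by simp)), pvTruncLT_snoc_stop st e l (by omega)]
      · rw [if_neg hl, pvTruncLT_eq_self]
        intro x hx
        rcases List.mem_append.mp hx with hx | hx
        · have := (List.pairwise_append.mp h).2.2 x hx e (by simp)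
          omega
        · simp at hx; subst hx; omega
    · rename_i heq
      rw [List.getLast?_concat] at heq
      cases heq

lemma pvPathify_truncLT (st : List (Int × String)) (pre : Option String) (l : Int) :
    pvPathify pre (pvTruncLT st l) = pvTruncLT (pvPathify pre st) l := by
  induction st generalizing pre with
  | nil => rfl
  | cons e rest ih =>
    obtain ⟨l1, n1⟩ := e
    by_cases h : l1 < l <;> simp [pvTruncLT, pvPathify, h, ih]

-- the parent's cumulative path extended by the new name is A's join over the popped stack
lemma pvPath_eq_join (st : List (Int × String)) (n : String) :
    (match ((pvPathify none st).getLast?).map (·.2) with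
      | none => n
      | some p => p ++ "/" ++ n) = pvJoin (st.map (·.2) ++ [n]) := by
  induction st using List.reverseRecOn with
  | nil => simp [pvPathify, pvJoin_singleton]
  | append_singleton st e _ =>
    obtain ⟨l0, n0⟩ := e
    rw [pvPathify_snoc]
    simp only [List.getLast?_concat, List.map_append, List.map_cons, List.map_nil,
      List.append_assoc, List.cons_append, List.nil_append, Option.map_some]
    rw [show List.map (fun x : Int × String => x.2) st ++ [n0, n]
        = (List.map (fun x : Int × String => x.2) st ++ [n0]) ++ [n] by simp,
      pvJoin_snoc _ n (by simp)]
    rfl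

-- one step of B's stage-2 loop applied through stage 1's optional parse (proof plumbing)
def pvStepB' (st : List String × List (Int × String)) (o : Option (Int × String)) :
    List String × List (Int × String) :=
  match o with
  | none => st
  | some node => pvStepB st node

-- the invariant tying A's stack to B's history of (level, path) records
def pvInv (stA : List (Int × String)) (hist : List (Int × String)) : Prop :=
  List.Pairwise (fun a b : Int × String => a.1 < b.1) stA ∧
  ∀ lv, pvParentPath hist lv = ((pvTruncLT (pvPathify none stA) lv).getLast?).map (·.2)

lemma pvMain_agree (paths : List String) (stA hist : List (Int × String))
    (h : pvInv stA hist) (lv : Int) (nm : String) :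
    (paths ++ [PySem.Str.join "/" ((pvPopGE stA lv ++ [(lv, nm)]).map (·.2))]
      = (pvStepB (paths, hist) (lv, nm)).1)
    ∧ pvInv (pvPopGE stA lv ++ [(lv, nm)]) (pvStepB (paths, hist) (lv, nm)).2 := by
  obtain ⟨hPW, hPar⟩ := h
  have hpop : pvPopGE stA lv = pvTruncLT stA lv := pvPopGE_eq_truncLT stA lv hPW
  have hst : pvPathify none (pvTruncLT stA lv) = pvTruncLT (pvPathify none stA) lv :=
    pvPathify_truncLT stA none lv
  have hpath := pvPath_eq_join (pvTruncLT stA lv) nm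
  -- the path B computes, as a join
  have hB : (match pvParentPath hist lv with
      | none => nm | some p => p ++ "/" ++ nm) = pvJoin ((pvTruncLT stA lv).map (·.2) ++ [nm]) := by
    rw [hPar lv, ← hst, hpath]
  refine ⟨?_, ?_, ?_⟩
  · simp only [pvStepB, hpop, hB]
    simp [pvJoin, List.map_append]
  · -- pairwise on A's new stack
    rw [hpop, List.pairwise_append]
    refine ⟨hPW.sublist (by rw [pvTruncLT_eq_takeWhile]; exact List.takeWhile_sublist _), by simp, ?_⟩
    intro x hx y hy
    simp only [List.mem_singleton] at hy
    subst hy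
    exact pvTruncLT_mem_lt stA lv x hx
  · -- the parent-path invariant for the new history
    intro l
    have hnewpath : pvPathify none (pvPopGE stA lv ++ [(lv, nm)])
        = pvTruncLT (pvPathify none stA) lv
            ++ [(lv, pvP none (pvJoin ((pvTruncLT stA lv).map (·.2) ++ [nm])))] := by
      rw [hpop, pvPathify_snoc, hst]
    simp only [pvStepB, hnewpath]
    by_cases hl : l ≤ lv
    · -- scan skips the new record; truncation drops the new entry and re-truncates
      simp only [pvParentPath, if_pos hl, hPar l]
      rw [pvTruncLT_snoc_stop _ _ _ (by simp; omega), pvTruncLT_trunc _ l lv hl]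
    · -- the new record is the parent; truncation keeps everything
      simp only [pvParentPath, if_neg hl]
      rw [pvTruncLT_eq_self _ l (by
        intro x hx
        rcases List.mem_append.mp hx with hx | hx
        · have := pvTruncLT_mem_lt (pvPathify none stA) lv x hx; omega
        · simp only [List.mem_singleton] at hx; subst hx; simpa using (by omega : lv < l))]
      rw [List.getLast?_concat, hB]
      rfl

set_option maxHeartbeats 2000000 in
lemma pvStep_agree (paths : List String) (stA hist : List (Int × String)) (line : String)
    (h : pvInv stA hist) :
    (pvStepA (paths, stA) line).1 = (pvStepB' (paths, hist) (pvParseLine line)).1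
      ∧ pvInv (pvStepA (paths, stA) line).2 (pvStepB' (paths, hist) (pvParseLine line)).2 := by
  by_cases h0 : PySem.Str.strip line = ""
  · -- blank line: A skips by its strip guard, B's stage 1 because split₀ of "" is empty
    have h2 : (PySem.Str.split₀ (PySem.Str.strip line)).length < 2 := by
      have hempty : (PySem.Str.split₀ (PySem.Str.strip line)).length = 0 := by rw [h0]; rfl
      omega
    simp only [pvStepA, pvParseLine, pvStepB', if_pos h0, if_pos h2]
    exact ⟨trivial, h⟩
  · by_cases h2 : (PySem.Str.split₀ (PySem.Str.strip line)).length < 2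
    · simp only [pvStepA, pvParseLine, pvStepB', if_neg h0, if_pos h2]
      exact ⟨trivial, h⟩
    · -- a significant line: both sides push the same node
      simp only [pvStepA, pvParseLine, pvStepB', if_neg h0, if_neg h2]
      exact pvMain_agree paths stA hist h _ _

set_option maxHeartbeats 2000000 in
lemma pvLoop_agree (lines : List String) (paths : List String) (stA hist : List (Int × String))
    (h : pvInv stA hist) :
    (lines.foldl pvStepA (paths, stA)).1
      = ((lines.filterMap pvParseLine).foldl pvStepB (paths, hist)).1 := by
  induction lines generalizing paths stA hist with
  | nil => rfl
  | cons line rest ih =>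
    have h' := pvStep_agree paths stA hist line h
    cases hp : pvParseLine line with
    | none =>
      rw [hp] at h'
      simp only [pvStepB'] at h'
      obtain ⟨h1, h2⟩ := h'
      simp only [List.foldl_cons, List.filterMap_cons, hp]
      rcases hA : pvStepA (paths, stA) line with ⟨pA, sA⟩
      rw [hA] at h1 h2
      simp only at h1 h2
      subst h1
      exact ih _ _ _ h2
    | some node =>
      rw [hp] at h'
      simp only [pvStepB'] at h'
      obtain ⟨h1, h2⟩ := h'
      simp only [List.foldl_cons, List.filterMap_cons, hp]
      rcases hA : pvStepA (paths, stA) line with ⟨pA, sA⟩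
      rcases hB : pvStepB (paths, hist) node with ⟨pB, hB2⟩
      rw [hA, hB] at h1 h2
      simp only at h1 h2
      subst h1
      exact ih _ _ _ h2

-- ===== VERDICT (by name: the statement is the Claim_ definition above) =====
theorem parse_tree_and_build_paths_spec : Claim_equal_parse_tree_and_build_paths := by
  intro tree_str _
  unfold Spec_parse_tree_and_build_paths parse_tree_and_build_paths parse_tree_and_build_paths_alt
  exact pvLoop_agree _ [] [] [] ⟨List.Pairwise.nil, fun lv => rfl⟩
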